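-- pv_equiv track=rewrite | github.com/openharmony/arkcompiler_runtime_core | static_core/tests/tests-u-runner-2/runner/suites/test_standard_flow.py | _remove_main_decl
-- ===== SOURCE A (Python) =====
-- def _remove_main_decl(lines: str) -> str:
--     expected = lines.split("\n")
--     index_to_delete = len(expected)
--     for i, item in enumerate(expected):
--         if '.main' in item or ':main' in item:
--             index_to_delete = i
--             break
--
--     return '\n'.join(expected[:index_to_delete])
-- ===== SOURCE B (Python) =====
-- def _remove_main_decl(lines: str) -> str:
--     # Search the raw string instead of splitting into lines: take the earliest
--     # occurrence of either marker, then cut at the newline that precedes it.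
--     p1 = lines.find('.main')
--     p2 = lines.find(':main')
--     p = p2 if p1 == -1 else (p1 if p2 == -1 else min(p1, p2))
--     if p == -1:
--         return lines
--     nl = lines.rfind('\n', 0, p)
--     return '' if nl == -1 else lines[:nl]
-- ===== Notes on version B (the rewrite author's own statement) =====
-- stated objective: alternative
-- what changed: B never builds the list of lines: it locates the earliest marker occurrence (the dotted or colon form of the main declaration) in the raw string with str.find and cuts at the preceding newline found by str.rfind, instead of splitting on newlines, scanning lines for the marker and re-joining the prefix.
import Mathlib
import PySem

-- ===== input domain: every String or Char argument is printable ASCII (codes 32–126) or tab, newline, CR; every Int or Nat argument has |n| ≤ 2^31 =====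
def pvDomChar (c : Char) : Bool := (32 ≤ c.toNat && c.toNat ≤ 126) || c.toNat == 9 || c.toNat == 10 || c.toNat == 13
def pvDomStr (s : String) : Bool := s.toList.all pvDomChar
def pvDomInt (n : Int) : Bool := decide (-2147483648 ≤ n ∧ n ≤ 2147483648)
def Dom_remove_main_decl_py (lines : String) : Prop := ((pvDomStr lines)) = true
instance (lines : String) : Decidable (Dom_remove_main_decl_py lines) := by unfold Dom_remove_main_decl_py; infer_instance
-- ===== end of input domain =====

-- B replaces A's split-into-lines / scan-lines / re-join pipeline by raw-string searches:
-- find the earliest '.main'/':main' occurrence, cut at the newline before it (same value, no line list).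

-- ===== PORT A =====
-- A's 'for i, item in enumerate(expected): if '.main' in item or ':main' in item: … break' loop:
-- first index whose line contains a marker, defaulting to len(expected).
def pvAFindIdx (expected : List (List Char)) : Nat :=
  match expected with
  | [] => 0
  | item :: rest =>
      if PySem.Chars.isIn ".main".toList item || PySem.Chars.isIn ":main".toList item then 0
      else pvAFindIdx rest + 1

def remove_main_decl_py (lines : String) : String :=
  let expected := PySem.Chars.splitOn lines.toList "\n".toList
  let index_to_delete := pvAFindIdx expected
  String.ofList (PySem.Chars.join "\n".toList (expected.take index_to_delete))

-- ===== PORT B =====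
def remove_main_decl_py_alt (lines : String) : String :=
  let p1 := PySem.Str.find lines ".main"
  let p2 := PySem.Str.find lines ":main"
  let p := if p1 = -1 then p2 else if p2 = -1 then p1 else min p1 p2
  if p = -1 then lines
  else
    let nl := PySem.Str.rfindFrom lines "\n" 0 (some p)
    if nl = -1 then "" else PySem.Str.slice lines none (some nl)

-- ===== PRECONDITION & SPEC =====
def Spec_remove_main_decl_py (lines : String) (out : String) : Prop := out = remove_main_decl_py_alt lines
instance (lines : String) (out : String) : Decidable (Spec_remove_main_decl_py lines out) := by unfold Spec_remove_main_decl_py; infer_instance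

-- ===== CLAIM (what is proved, stated in full; the proofs are below) =====
def Claim_equal_remove_main_decl_py : Prop := ∀ (lines : String), Dom_remove_main_decl_py lines → Spec_remove_main_decl_py lines (remove_main_decl_py lines)

-- ===== LEMMAS AND PROOFS =====

def pvModel : List Char → List (List Char)
  | [] => [[]]
  | c :: rest => if c = '\n' then [] :: pvModel rest else (pvModel rest).modifyHead (c :: ·)

lemma pvNlList : "\n".toList = ['\n'] := by decide

lemma pvGo_eq (fuel : Nat) : ∀ (l cur : List Char) (accs : List (List Char)), l.length < fuel →
    PySem.Chars.splitOn.go ['\n'] fuel l cur accs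
      = accs.reverse ++ (pvModel l).modifyHead (cur.reverse ++ ·) := by
  induction fuel with
  | zero => intro l cur accs h; omega
  | succ f ih =>
    intro l cur accs h
    cases l with
    | nil =>
      rw [PySem.Chars.splitOn.go]
      · simp [pvModel]
      · omega
    | cons c rest =>
      rw [PySem.Chars.splitOn.go]
      by_cases hc : c = '\n'
      · subst hc
        have hpre : ['\n'].isPrefixOf ('\n' :: rest) = true := by
          simp [List.isPrefixOf]
        rw [if_pos hpre]
        rw [show ('\n' :: rest).drop (['\n'].length) = rest by simp]
        rw [ih rest [] (cur.reverse :: accs) (by simpa using Nat.lt_of_succ_lt_succ h)]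
        simp [pvModel]
        exact congrFun List.modifyHead_id _
      · have hpre : ['\n'].isPrefixOf (c :: rest) = false := by
          simp [List.isPrefixOf]
          exact fun hcc => hc hcc.symm
        rw [if_neg (by simp [hpre])]
        rw [ih rest (c :: cur) accs (by simpa using Nat.lt_of_succ_lt_succ h)]
        simp only [pvModel, if_neg hc]
        rw [List.modifyHead_modifyHead]
        congr 2
        funext x
        simp

lemma pvSplitOn_eq_model (cs : List Char) :
    PySem.Chars.splitOn cs "\n".toList = pvModel cs := by
  show PySem.Chars.splitOn.go "\n".toList (cs.length + 1) cs [] [] = pvModel cs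
  rw [pvNlList, pvGo_eq (cs.length + 1) cs [] [] (by omega)]
  simp
  exact congrFun List.modifyHead_id _

lemma pvModel_ne_nil (cs : List Char) : pvModel cs ≠ [] := by
  induction cs with
  | nil => simp [pvModel]
  | cons c rest ih =>
    simp only [pvModel]
    split
    · simp
    · cases h : pvModel rest with
      | nil => exact absurd h ih
      | cons a t => simp

lemma pvJoin_model (cs : List Char) :
    PySem.Chars.join "\n".toList (pvModel cs) = cs := by
  induction cs with
  | nil => simp [pvModel, PySem.Chars.join_singleton]
  | cons c rest ih =>
    by_cases hc : c = '\n'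
    · subst hc
      rw [show pvModel ('\n' :: rest) = [] :: pvModel rest by simp [pvModel]]
      cases h : pvModel rest with
      | nil => exact absurd h (pvModel_ne_nil rest)
      | cons y t =>
        rw [PySem.Chars.join_cons_cons, ← h, ih, pvNlList]
        simp
    · simp only [pvModel, if_neg hc]
      cases h : pvModel rest with
      | nil => exact absurd h (pvModel_ne_nil rest)
      | cons y t =>
        cases t with
        | nil =>
          simp only [List.modifyHead_cons]
          rw [PySem.Chars.join_singleton]
          rw [h, PySem.Chars.join_singleton] at ih
          rw [ih]
        | cons z t' =>
          simp only [List.modifyHead_cons]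
          rw [PySem.Chars.join_cons_cons]
          rw [h, PySem.Chars.join_cons_cons] at ih
          rw [List.cons_append, List.cons_append, ih]

lemma pvModel_cases (cs : List Char) :
    ('\n' ∉ cs ∧ pvModel cs = [cs]) ∨
    (∃ l rest, cs = l ++ '\n' :: rest ∧ '\n' ∉ l ∧ pvModel cs = l :: pvModel rest) := by
  induction cs with
  | nil => exact Or.inl ⟨by simp, by simp [pvModel]⟩
  | cons c rest ih =>
    by_cases hc : c = '\n'
    · subst hc
      exact Or.inr ⟨[], rest, by simp, by simp, by simp [pvModel]⟩
    · rcases ih with ⟨h1, h2⟩ | ⟨l, r, he, hnl, hm⟩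
      · refine Or.inl ⟨fun hm => by rcases List.mem_cons.mp hm with h|h; exact hc h.symm; exact h1 h, ?_⟩
        simp [pvModel, hc, h2]
      · refine Or.inr ⟨c :: l, r, by simp [he], fun hm => by rcases List.mem_cons.mp hm with h|h; exact hc h.symm; exact hnl h, ?_⟩
        simp [pvModel, hc, hm]

lemma pvRfindGo_zero (s sub : List Char) :
    PySem.Chars.rfind.go s sub 0 = if sub.isPrefixOf s then 0 else -1 := by
  rw [PySem.Chars.rfind.go]

lemma pvRfindGo_succ (s sub : List Char) (k : Nat) :
    PySem.Chars.rfind.go s sub (k+1)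
      = if sub.isPrefixOf (s.drop (k+1)) then ((k+1 : Nat) : Int) else PySem.Chars.rfind.go s sub k := by
  rw [PySem.Chars.rfind.go]

lemma pvRfindGo_cons (a : Char) (s sub : List Char) (k : Nat) :
    PySem.Chars.rfind.go (a :: s) sub (k+1)
      = if PySem.Chars.rfind.go s sub k = -1 then PySem.Chars.rfind.go (a :: s) sub 0
        else PySem.Chars.rfind.go s sub k + 1 := by
  induction k with
  | zero =>
    rw [pvRfindGo_succ]
    simp only [List.drop_succ_cons, List.drop_zero]
    by_cases hp : sub.isPrefixOf s
    · rw [if_pos hp, pvRfindGo_zero, if_pos hp]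
      norm_num
    · rw [if_neg hp, pvRfindGo_zero s sub, if_neg hp]
      simp
  | succ k ih =>
    rw [pvRfindGo_succ (a :: s), pvRfindGo_succ s]
    simp only [List.drop_succ_cons]
    by_cases hp : sub.isPrefixOf (s.drop (k+1))
    · rw [if_pos hp, if_pos hp]
      rw [if_neg (by omega)]
      push_cast; ring
    · rw [if_neg hp, if_neg hp, ih]

lemma pvRfind_nil (sub : List Char) (h : sub ≠ []) : PySem.Chars.rfind [] sub = -1 := by
  show PySem.Chars.rfind.go [] sub 0 = -1
  rw [pvRfindGo_zero]
  cases sub with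
  | nil => exact absurd rfl h
  | cons a t => simp [List.isPrefixOf]

lemma pvRfind_cons (a c : Char) (s : List Char) :
    PySem.Chars.rfind (a :: s) [c]
      = if PySem.Chars.rfind s [c] = -1 then (if a = c then 0 else -1)
        else PySem.Chars.rfind s [c] + 1 := by
  show PySem.Chars.rfind.go (a :: s) [c] (s.length + 1) = _
  rw [pvRfindGo_cons]
  have h0 : PySem.Chars.rfind.go (a :: s) [c] 0 = if a = c then 0 else -1 := by
    rw [pvRfindGo_zero]
    by_cases hac : a = c
    · subst hac; simp [List.isPrefixOf]
    · rw [if_neg, if_neg hac]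
      simp [List.isPrefixOf]
      exact fun hh => hac hh.symm
  rw [h0]
  rfl

lemma pvRfind_single_nonneg (s : List Char) (c : Char) :
    PySem.Chars.rfind s [c] = -1 ∨ 0 ≤ PySem.Chars.rfind s [c] := by
  induction s with
  | nil => exact Or.inl (pvRfind_nil [c] (by simp))
  | cons a t ih =>
    rw [pvRfind_cons]
    by_cases h : PySem.Chars.rfind t [c] = -1
    · rw [if_pos h]
      split
      · right; omega
      · left; rfl
    · rw [if_neg h]
      rcases ih with h' | h'
      · exact absurd h' h
      · right; omega

lemma pvRfind_single_neg_iff (s : List Char) (c : Char) :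
    PySem.Chars.rfind s [c] = -1 ↔ c ∉ s := by
  induction s with
  | nil => simp [pvRfind_nil [c] (by simp)]
  | cons a t ih =>
    rw [pvRfind_cons]
    by_cases h : PySem.Chars.rfind t [c] = -1
    · rw [if_pos h]
      by_cases hac : a = c
      · subst hac; simp
      · rw [if_neg hac]
        constructor
        · intro _
          simp only [List.mem_cons, not_or]
          exact ⟨fun hh => hac hh.symm, ih.mp h⟩
        · intro _; rfl
    · rw [if_neg h]
      rcases pvRfind_single_nonneg t c with h' | h'
      · exact absurd h' h
      · constructor
        · intro hh; omega
        · intro hh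
          simp only [List.mem_cons, not_or] at hh
          exact absurd (ih.mpr hh.2) h

lemma pvRfind_append_cons (l xs : List Char) (c : Char) (hl : c ∉ l) :
    PySem.Chars.rfind (l ++ c :: xs) [c]
      = if PySem.Chars.rfind xs [c] = -1 then (l.length : Int)
        else (l.length : Int) + 1 + PySem.Chars.rfind xs [c] := by
  induction l with
  | nil =>
    simp only [List.nil_append, List.length_nil, Nat.cast_zero]
    rw [pvRfind_cons]
    by_cases h : PySem.Chars.rfind xs [c] = -1
    · rw [if_pos h, if_pos h, if_pos rfl]
    · rw [if_neg h, if_neg h]; ring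
  | cons a l ih =>
    have ha : a ≠ c := fun hh => hl (by simp [hh])
    have hl' : c ∉ l := fun hh => hl (by simp [hh])
    rw [List.cons_append, pvRfind_cons, ih hl']
    by_cases h : PySem.Chars.rfind xs [c] = -1
    · rw [if_pos h, if_pos h]
      rw [if_neg (by omega)]
      simp only [List.length_cons]
      push_cast; ring
    · rcases pvRfind_single_nonneg xs c with h' | h'
      · exact absurd h' h
      · rw [if_neg h, if_neg h]
        rw [if_neg (by omega)]
        simp only [List.length_cons]
        push_cast; ring

lemma pvRfindFrom_eval (cs sub : List Char) (p : Int) (h0 : 0 ≤ p) (h1 : p ≤ cs.length) :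
    PySem.Chars.rfindFrom cs sub 0 (some p) = PySem.Chars.rfind (cs.take p.toNat) sub := by
  simp only [PySem.Chars.rfindFrom]
  rw [if_neg (by omega : ¬ ((cs.length:Int) < p)), if_neg (by omega : ¬ (0:Int) < 0)]
  rw [if_neg (by omega : ¬ p < (0:Int))]
  simp only [Int.toNat_zero, List.drop_zero, zero_add]
  rw [if_neg (by omega : ¬ p < (0:Int))]
  by_cases hr : PySem.Chars.rfind (cs.take p.toNat) sub = -1
  · rw [if_pos hr, hr]
  · rw [if_neg hr]

lemma pvFind_eq_coe (s sub : List Char) (i : Nat) (h1 : sub <+: s.drop i)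
    (h2 : ∀ j < i, ¬ sub <+: s.drop j) : PySem.Chars.find s sub = (i : Int) := by
  have hinf : sub <:+: s := (h1.isInfix).trans (List.drop_suffix i s).isInfix
  have h0 : 0 ≤ PySem.Chars.find s sub := (PySem.Chars.find_nonneg_iff s sub).mpr hinf
  obtain ⟨hp, hmin⟩ := PySem.Chars.find_spec h0
  have : (PySem.Chars.find s sub).toNat = i := by
    rcases Nat.lt_trichotomy (PySem.Chars.find s sub).toNat i with h | h | h
    · exact absurd hp (h2 _ h)
    · exact h
    · exact absurd h1 (hmin i h)
  omega

lemma pvOcc_iff (l rest M : List Char) (j : Nat) (hM : '\n' ∉ M) :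
    M <+: (l ++ '\n' :: rest).drop j ↔
      (j + M.length ≤ l.length ∧ M <+: l.drop j) ∨
      (l.length + 1 ≤ j ∧ M <+: rest.drop (j - (l.length + 1))) := by
  by_cases hj : j ≤ l.length
  · rw [List.drop_append_of_le_length hj]
    constructor
    · intro h
      by_cases hlen : j + M.length ≤ l.length
      · left
        refine ⟨hlen, ?_⟩
        have hml : M.length ≤ (l.drop j).length := by simp [List.length_drop]; omega
        exact ((List.isPrefix_append_of_length hml).mp h)
      · exfalso
        have hk : l.length - j < M.length := by omega
        have hgl := List.IsPrefix.getElem h hk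
        rw [List.getElem_append_right (by simp [List.length_drop])] at hgl
        simp only [List.length_drop, Nat.sub_self, List.getElem_cons_zero] at hgl
        exact hM (hgl ▸ List.getElem_mem hk)
    · rintro (⟨hlen, h⟩ | ⟨hge, h⟩)
      · have hml : M.length ≤ (l.drop j).length := by simp [List.length_drop]; omega
        exact (List.isPrefix_append_of_length hml).mpr h
      · omega
  · have key : (l ++ '\n' :: rest).drop j = rest.drop (j - (l.length + 1)) := by
      rw [show j = l.length + (j - l.length) from by omega, List.drop_length_add_append,
        show j - l.length = (j - l.length - 1) + 1 from by omega, List.drop_succ_cons]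
      congr 1
      omega
    rw [key]
    constructor
    · intro h
      exact Or.inr ⟨by omega, h⟩
    · rintro (⟨hlen, h⟩ | ⟨hge, h⟩)
      · omega
      · exact h

lemma pvInfix_of_prefix_drop (M s : List Char) (j : Nat) (h : M <+: s.drop j) : M <:+: s :=
  (h.isInfix).trans (List.drop_suffix j s).isInfix

lemma pvInfix_iff_exists_drop (M s : List Char) : M <:+: s ↔ ∃ j : Nat, M <+: s.drop j := by
  constructor
  · intro h
    have := (PySem.Chars.isIn_iff_infix M s).mpr h
    exact (PySem.Chars.exists_prefix_drop_iff_isIn M s).mpr this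
  · rintro ⟨j, h⟩
    exact pvInfix_of_prefix_drop M s j h

lemma pvFind_append_in_l (l rest M : List Char) (hM : '\n' ∉ M) (h : M <:+: l) :
    PySem.Chars.find (l ++ '\n' :: rest) M = PySem.Chars.find l M := by
  have h0 : 0 ≤ PySem.Chars.find l M := (PySem.Chars.find_nonneg_iff l M).mpr h
  obtain ⟨hp, hmin⟩ := PySem.Chars.find_spec h0
  set f := (PySem.Chars.find l M).toNat with hf
  have hlen : M.length ≤ l.length - f := by
    have := hp.length_le
    simpa [List.length_drop] using this
  have hfle : f ≤ l.length := by
    have := PySem.Chars.find_le_length l M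
    omega
  have key : PySem.Chars.find (l ++ '\n' :: rest) M = ((f : Nat) : Int) := by
    apply pvFind_eq_coe
    · rw [pvOcc_iff l rest M _ hM]
      exact Or.inl ⟨by omega, hp⟩
    · intro j hj hpre
      rw [pvOcc_iff l rest M _ hM] at hpre
      rcases hpre with ⟨_, hpre⟩ | ⟨hge, _⟩
      · exact hmin j hj hpre
      · omega
  rw [key]
  omega

lemma pvFind_append_not_in_l (l rest M : List Char) (hM : '\n' ∉ M)
    (hnl : ¬ M <:+: l) (hr : M <:+: rest) :
    PySem.Chars.find (l ++ '\n' :: rest) M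
      = (l.length : Int) + 1 + PySem.Chars.find rest M := by
  have h0 : 0 ≤ PySem.Chars.find rest M := (PySem.Chars.find_nonneg_iff rest M).mpr hr
  obtain ⟨hp, hmin⟩ := PySem.Chars.find_spec h0
  set f := (PySem.Chars.find rest M).toNat with hf
  have key : PySem.Chars.find (l ++ '\n' :: rest) M = ((l.length + 1 + f : Nat) : Int) := by
    apply pvFind_eq_coe
    · rw [pvOcc_iff l rest M _ hM]
      exact Or.inr ⟨by omega, by rw [show l.length + 1 + f - (l.length + 1) = f by omega]; exact hp⟩
    · intro j hj hpre
      rw [pvOcc_iff l rest M _ hM] at hpre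
      rcases hpre with ⟨_, hpre⟩ | ⟨hge, hpre⟩
      · exact hnl (pvInfix_of_prefix_drop M l j hpre)
      · exact hmin _ (by omega) hpre
  rw [key]; push_cast; omega

lemma pvFind_append_none (l rest M : List Char) (hM : '\n' ∉ M)
    (hnl : ¬ M <:+: l) (hnr : ¬ M <:+: rest) :
    PySem.Chars.find (l ++ '\n' :: rest) M = -1 := by
  rw [PySem.Chars.find_eq_neg_one_iff]
  intro hinf
  obtain ⟨j, hpre⟩ := (pvInfix_iff_exists_drop _ _).mp hinf
  rw [pvOcc_iff l rest M _ hM] at hpre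
  rcases hpre with ⟨_, hpre⟩ | ⟨_, hpre⟩
  · exact hnl (pvInfix_of_prefix_drop M l j hpre)
  · exact hnr (pvInfix_of_prefix_drop M rest _ hpre)

def pvP (cs : List Char) : Int :=
  if PySem.Chars.find cs ".main".toList = -1 then PySem.Chars.find cs ":main".toList
  else if PySem.Chars.find cs ":main".toList = -1 then PySem.Chars.find cs ".main".toList
  else min (PySem.Chars.find cs ".main".toList) (PySem.Chars.find cs ":main".toList)

lemma pvP_neg_iff (cs : List Char) :
    pvP cs = -1 ↔ PySem.Chars.find cs ".main".toList = -1 ∧ PySem.Chars.find cs ":main".toList = -1 := by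
  have a1 := PySem.Chars.neg_one_le_find cs ".main".toList
  have a2 := PySem.Chars.neg_one_le_find cs ":main".toList
  unfold pvP
  split_ifs with h1 h2 <;> first | (simp_all; omega) | simp_all

lemma pvP_le_find1 (cs : List Char) (h : PySem.Chars.find cs ".main".toList ≠ -1) :
    pvP cs ≤ PySem.Chars.find cs ".main".toList := by
  have a2 := PySem.Chars.neg_one_le_find cs ":main".toList
  unfold pvP; split_ifs <;> omega

lemma pvP_le_find2 (cs : List Char) (h : PySem.Chars.find cs ":main".toList ≠ -1) :
    pvP cs ≤ PySem.Chars.find cs ":main".toList := by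
  have a1 := PySem.Chars.neg_one_le_find cs ".main".toList
  unfold pvP; split_ifs <;> omega

lemma pvP_attains (cs : List Char) (h : pvP cs ≠ -1) :
    (PySem.Chars.find cs ".main".toList = pvP cs ∨ PySem.Chars.find cs ":main".toList = pvP cs)
      ∧ 0 ≤ pvP cs := by
  have a1 := PySem.Chars.neg_one_le_find cs ".main".toList
  have a2 := PySem.Chars.neg_one_le_find cs ":main".toList
  have b1 := PySem.Chars.find_nonneg_iff cs ".main".toList
  have b2 := PySem.Chars.find_nonneg_iff cs ":main".toList
  have c1 := PySem.Chars.find_ne_neg_one_iff cs ".main".toList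
  have c2 := PySem.Chars.find_ne_neg_one_iff cs ":main".toList
  unfold pvP at *
  split_ifs at * with h1 h2
  · constructor
    · right; rfl
    · have : PySem.Chars.find cs ":main".toList ≠ -1 := by simpa [h1] using h
      have := b2.mpr (c2.mp this)
      omega
  · constructor
    · left; rfl
    · have := b1.mpr (c1.mp h1)
      omega
  · have n1 := b1.mpr (c1.mp h1)
    have n2 := b2.mpr (c2.mp h2)
    constructor
    · rcases le_total (PySem.Chars.find cs ".main".toList) (PySem.Chars.find cs ":main".toList) with hle | hle
      · left; omega
      · right; omega
    · omega

lemma pvP_le_length (cs : List Char) : pvP cs ≤ (cs.length : Int) := by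
  have a1 := PySem.Chars.find_le_length cs ".main".toList
  have a2 := PySem.Chars.find_le_length cs ":main".toList
  unfold pvP; split_ifs <;> omega

lemma pvP_append (l rest : List Char) (hn1 : ¬ ".main".toList <:+: l) (hn2 : ¬ ":main".toList <:+: l) :
    pvP (l ++ '\n' :: rest) = if pvP rest = -1 then -1 else ((l.length : Int) + 1) + pvP rest := by
  have hM1 : '\n' ∉ ".main".toList := by decide
  have hM2 : '\n' ∉ ":main".toList := by decide
  by_cases i1 : ".main".toList <:+: rest <;> by_cases i2 : ":main".toList <:+: rest
  · have e1 := pvFind_append_not_in_l l rest _ hM1 hn1 i1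
    have e2 := pvFind_append_not_in_l l rest _ hM2 hn2 i2
    have n1 := (PySem.Chars.find_nonneg_iff rest ".main".toList).mpr i1
    have n2 := (PySem.Chars.find_nonneg_iff rest ":main".toList).mpr i2
    unfold pvP
    rw [e1, e2]
    split_ifs <;> omega
  · have e1 := pvFind_append_not_in_l l rest _ hM1 hn1 i1
    have e2 := pvFind_append_none l rest _ hM2 hn2 i2
    have n1 := (PySem.Chars.find_nonneg_iff rest ".main".toList).mpr i1
    have z2 := (PySem.Chars.find_eq_neg_one_iff rest ":main".toList).mpr i2
    unfold pvP
    rw [e1, e2, z2]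
    split_ifs <;> omega
  · have e1 := pvFind_append_none l rest _ hM1 hn1 i1
    have e2 := pvFind_append_not_in_l l rest _ hM2 hn2 i2
    have n2 := (PySem.Chars.find_nonneg_iff rest ":main".toList).mpr i2
    have z1 := (PySem.Chars.find_eq_neg_one_iff rest ".main".toList).mpr i1
    unfold pvP
    rw [e1, e2, z1]
    split_ifs <;> omega
  · have e1 := pvFind_append_none l rest _ hM1 hn1 i1
    have e2 := pvFind_append_none l rest _ hM2 hn2 i2
    have z1 := (PySem.Chars.find_eq_neg_one_iff rest ".main".toList).mpr i1
    have z2 := (PySem.Chars.find_eq_neg_one_iff rest ":main".toList).mpr i2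
    unfold pvP
    rw [e1, e2, z1, z2]
    simp

lemma pvModel_head (cs : List Char) :
    ∃ t, pvModel cs = cs.takeWhile (· ≠ '\n') :: t := by
  induction cs with
  | nil => exact ⟨[], by simp [pvModel]⟩
  | cons c rest ih =>
    by_cases hc : c = '\n'
    · subst hc
      refine ⟨pvModel rest, ?_⟩
      simp [pvModel, List.takeWhile]
    · obtain ⟨t, ht⟩ := ih
      refine ⟨t, ?_⟩
      simp only [pvModel, if_neg hc, ht, List.modifyHead_cons]
      rw [List.takeWhile_cons_of_pos (by simp [hc])]

lemma pvModel_mem_infix (cs : List Char) (x : List Char) (hx : x ∈ pvModel cs) : x <:+: cs := by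
  induction cs generalizing x with
  | nil =>
    simp [pvModel] at hx
    simp [hx]
  | cons c rest ih =>
    by_cases hc : c = '\n'
    · subst hc
      rw [show pvModel ('\n' :: rest) = [] :: pvModel rest from by simp [pvModel]] at hx
      rcases List.mem_cons.mp hx with rfl | hx
      · exact List.nil_infix
      · exact ((ih x hx).trans (List.suffix_cons '\n' rest).isInfix)
    · obtain ⟨t, ht⟩ := pvModel_head rest
      rw [show pvModel (c :: rest) = (c :: rest.takeWhile (· ≠ '\n')) :: t from by
        simp only [pvModel, if_neg hc, ht, List.modifyHead_cons]] at hx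
      rcases List.mem_cons.mp hx with rfl | hx
      · exact (List.cons_prefix_cons.mpr ⟨rfl, List.takeWhile_prefix _⟩).isInfix
      · exact ((ih x (by rw [ht]; exact List.mem_cons_of_mem _ hx)).trans
          (List.suffix_cons c rest).isInfix)

lemma pvTakeWhile_ge (ds : List Char) (m : Nat) (hm : m ≤ ds.length)
    (h : ∀ i (hi : i < m), ds[i]'(by omega) ≠ '\n') :
    m ≤ (ds.takeWhile (· ≠ '\n')).length := by
  induction ds generalizing m with
  | nil => simpa using hm
  | cons c r ih =>
    cases m with
    | zero => simp
    | succ m' =>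
      have hc : c ≠ '\n' := by have := h 0 (by omega); simpa using this
      rw [List.takeWhile_cons_of_pos (by simp [hc])]
      simp only [List.length_cons]
      have := ih m' (by simpa using hm) (fun i hi => by
        have := h (i+1) (by omega); simpa using this)
      omega

-- If a marker occurs inside the first line, there is no newline before the earliest marker.
lemma pvNoNl_of_first (ds M : List Char) (hMne : M ≠ []) (hM : M <:+: ds.takeWhile (· ≠ '\n'))
    (hle : pvP ds ≤ PySem.Chars.find ds M) :
    '\n' ∉ ds.take (pvP ds).toNat := by
  set tw := ds.takeWhile (· ≠ '\n') with htw
  obtain ⟨j, hj⟩ := (pvInfix_iff_exists_drop M tw).mp hM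
  have htwp : tw <+: ds := List.takeWhile_prefix _
  have hdj : M <+: ds.drop j := hj.trans (htwp.drop j)
  have hfd : 0 ≤ PySem.Chars.find ds M :=
    (PySem.Chars.find_nonneg_iff ds M).mpr (pvInfix_of_prefix_drop M ds j hdj)
  obtain ⟨_, hmin⟩ := PySem.Chars.find_spec hfd
  have hfj : (PySem.Chars.find ds M).toNat ≤ j := by
    by_contra hc
    exact hmin j (by omega) hdj
  have hjtw : j ≤ tw.length := by
    by_cases hh : j ≤ tw.length
    · exact hh
    · have hnil : tw.drop j = [] := List.drop_eq_nil_of_le (by omega)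
      rw [hnil] at hj
      exact absurd (List.prefix_nil.mp hj) hMne
  have hple : (pvP ds).toNat ≤ tw.length := by omega
  obtain ⟨tt, htt⟩ := htwp
  have hseq : ds.take (pvP ds).toNat = tw.take (pvP ds).toNat := by
    calc ds.take (pvP ds).toNat = (tw ++ tt).take (pvP ds).toNat := by rw [htt]
    _ = tw.take (pvP ds).toNat := List.take_append_of_le_length hple
  intro hmem
  rw [hseq] at hmem
  have := List.mem_takeWhile_imp (List.mem_of_mem_take hmem)
  simp at this

-- Conversely: no newline before the earliest marker puts that marker in the first line.
lemma pvFirst_of_noNl (ds M : List Char) (hM : '\n' ∉ M)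
    (hfind : PySem.Chars.find ds M = pvP ds) (h0 : 0 ≤ pvP ds)
    (hnl : '\n' ∉ ds.take (pvP ds).toNat) :
    M <:+: ds.takeWhile (· ≠ '\n') := by
  have hfd : 0 ≤ PySem.Chars.find ds M := by omega
  obtain ⟨hpre, _⟩ := PySem.Chars.find_spec hfd
  rw [hfind] at hpre
  have hplen : (pvP ds).toNat ≤ ds.length := by
    have := pvP_le_length ds
    omega
  have hlen : M.length ≤ ds.length - (pvP ds).toNat := by
    have := hpre.length_le
    simpa [List.length_drop] using this
  have htwlen : (pvP ds).toNat + M.length ≤ (ds.takeWhile (· ≠ '\n')).length := by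
    apply pvTakeWhile_ge ds _ (by omega)
    intro i hi
    by_cases hip : i < (pvP ds).toNat
    · intro hcon
      apply hnl
      have hgt : (ds.take (pvP ds).toNat)[i]'(by simp; omega) = ds[i]'(by omega) :=
        List.getElem_take
      rw [← hcon, ← hgt]
      exact List.getElem_mem _
    · have hk : i - (pvP ds).toNat < M.length := by omega
      have h1 := hpre.getElem hk
      have h2 : (ds.drop (pvP ds).toNat)[i - (pvP ds).toNat]'(by
          simp only [List.length_drop]; omega) = ds[(pvP ds).toNat + (i - (pvP ds).toNat)]'(by omega) :=
        List.getElem_drop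
      have h3 := h1.trans h2
      intro hcon
      apply hM
      have h4 : ds[(pvP ds).toNat + (i - (pvP ds).toNat)]'(by omega) = ds[i]'(by omega) := by
        congr 1
        omega
      rw [h4, hcon] at h3
      exact h3 ▸ List.getElem_mem hk
  have htwd : (ds.takeWhile (· ≠ '\n')).drop (pvP ds).toNat <+: ds.drop (pvP ds).toNat :=
    (List.takeWhile_prefix _).drop _
  have hMtw : M <+: (ds.takeWhile (· ≠ '\n')).drop (pvP ds).toNat :=
    List.prefix_of_prefix_length_le hpre htwd (by simp only [List.length_drop]; omega)
  exact pvInfix_of_prefix_drop M _ _ hMtw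


-- the two ports, seen on the character-list level
def pvA (cs : List Char) : List Char :=
  PySem.Chars.join "\n".toList ((pvModel cs).take (pvAFindIdx (pvModel cs)))

def pvB (cs : List Char) : List Char :=
  if pvP cs = -1 then cs
  else
    if PySem.Chars.rfindFrom cs "\n".toList 0 (some (pvP cs)) = -1 then []
    else PySem.Chars.slice cs none (some (PySem.Chars.rfindFrom cs "\n".toList 0 (some (pvP cs))))

lemma pvA_port (lines : String) :
    remove_main_decl_py lines = String.ofList (pvA lines.toList) := by
  unfold remove_main_decl_py pvA
  rw [pvSplitOn_eq_model]

lemma pvB_port (lines : String) :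
    remove_main_decl_py_alt lines = String.ofList (pvB lines.toList) := by
  unfold remove_main_decl_py_alt pvB pvP
  simp only [PySem.Str.find, PySem.Str.rfindFrom, PySem.Str.slice]
  rw [show "\n".toList = ['\n'] from rfl]
  split_ifs <;> simp [String.ofList_toList]

lemma pvAFindIdx_all (ls : List (List Char))
    (h : ∀ x ∈ ls, (PySem.Chars.isIn ".main".toList x || PySem.Chars.isIn ":main".toList x) = false) :
    pvAFindIdx ls = ls.length := by
  induction ls with
  | nil => rfl
  | cons a t ih =>
    have ha := h a (List.mem_cons_self)
    unfold pvAFindIdx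
    rw [if_neg (by rw [ha]; simp), ih (fun x hx => h x (List.mem_cons_of_mem a hx))]
    rfl

-- first marker in the first line ⟺ no newline before the earliest marker occurrence
lemma pvHead_mark_iff (rest : List Char) (h : pvP rest ≠ -1) :
    (PySem.Chars.isIn ".main".toList (rest.takeWhile (· ≠ '\n')) ||
     PySem.Chars.isIn ":main".toList (rest.takeWhile (· ≠ '\n'))) = true
      ↔ PySem.Chars.rfind (rest.take (pvP rest).toNat) ['\n'] = -1 := by
  obtain ⟨hat, h0⟩ := pvP_attains rest h
  rw [pvRfind_single_neg_iff]
  constructor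
  · intro hm
    rcases Bool.or_eq_true_iff.mp hm with hm1 | hm1
    · have hinf := (PySem.Chars.isIn_iff_infix _ _).mp hm1
      have hres : ".main".toList <:+: rest :=
        hinf.trans (List.takeWhile_prefix _).isInfix
      exact pvNoNl_of_first rest _ (by decide) hinf
        (pvP_le_find1 rest ((PySem.Chars.find_ne_neg_one_iff _ _).mpr hres))
    · have hinf := (PySem.Chars.isIn_iff_infix _ _).mp hm1
      have hres : ":main".toList <:+: rest :=
        hinf.trans (List.takeWhile_prefix _).isInfix
      exact pvNoNl_of_first rest _ (by decide) hinf
        (pvP_le_find2 rest ((PySem.Chars.find_ne_neg_one_iff _ _).mpr hres))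
  · intro hnl
    rcases hat with hat | hat
    · exact Bool.or_eq_true_iff.mpr (Or.inl ((PySem.Chars.isIn_iff_infix _ _).mpr
        (pvFirst_of_noNl rest _ (by decide) hat h0 hnl)))
    · exact Bool.or_eq_true_iff.mpr (Or.inr ((PySem.Chars.isIn_iff_infix _ _).mpr
        (pvFirst_of_noNl rest _ (by decide) hat h0 hnl)))

lemma pvB_eq_nil (cs : List Char) (hpne : pvP cs ≠ -1)
    (hnl : '\n' ∉ cs.take (pvP cs).toNat) : pvB cs = [] := by
  obtain ⟨_, h0⟩ := pvP_attains cs hpne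
  unfold pvB
  rw [if_neg hpne, pvNlList, pvRfindFrom_eval cs _ _ h0 (pvP_le_length cs),
      if_pos ((pvRfind_single_neg_iff _ _).mpr hnl)]

theorem pvMain : ∀ (n : Nat) (cs : List Char), cs.length ≤ n → pvA cs = pvB cs := by
  intro n
  induction n with
  | zero =>
    intro cs hlen
    have hnil : cs = [] := List.eq_nil_of_length_eq_zero (by omega)
    subst hnil
    decide
  | succ n ih =>
    intro cs hlen
    rcases pvModel_cases cs with ⟨hnin, hm⟩ | ⟨l, rest, he, hl, hm⟩
    · -- cs is a single line (no newline in it)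
      by_cases hmark : (PySem.Chars.isIn ".main".toList cs || PySem.Chars.isIn ":main".toList cs) = true
      · have hA : pvA cs = [] := by
          unfold pvA
          rw [hm]
          simp only [pvAFindIdx]
          rw [if_pos hmark]
          simp [PySem.Chars.join_nil]
        have hpne : pvP cs ≠ -1 := by
          intro hc
          obtain ⟨h1, h2⟩ := (pvP_neg_iff cs).mp hc
          rcases Bool.or_eq_true_iff.mp hmark with hm1 | hm1
          · exact ((PySem.Chars.find_ne_neg_one_iff _ _).mpr ((PySem.Chars.isIn_iff_infix _ _).mp hm1)) h1
          · exact ((PySem.Chars.find_ne_neg_one_iff _ _).mpr ((PySem.Chars.isIn_iff_infix _ _).mp hm1)) h2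
        rw [hA, pvB_eq_nil cs hpne (fun hmem => hnin (List.mem_of_mem_take hmem))]
      · have hor := Bool.or_eq_false_iff.mp (Bool.eq_false_iff.mpr hmark)
        have hA : pvA cs = cs := by
          unfold pvA
          rw [hm]
          simp only [pvAFindIdx]
          rw [if_neg hmark]
          simp [PySem.Chars.join_singleton]
        have hp : pvP cs = -1 := (pvP_neg_iff cs).mpr
          ⟨(PySem.Chars.find_eq_neg_one_iff _ _).mpr ((PySem.Chars.isIn_eq_false_iff _ _).mp hor.1),
           (PySem.Chars.find_eq_neg_one_iff _ _).mpr ((PySem.Chars.isIn_eq_false_iff _ _).mp hor.2)⟩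
        have hB : pvB cs = cs := by unfold pvB; rw [if_pos hp]
        rw [hA, hB]
    · -- cs = l ++ '\n' :: rest
      subst he
      have hrlen : rest.length ≤ n := by
        simp only [List.length_append, List.length_cons] at hlen
        omega
      by_cases hml : (PySem.Chars.isIn ".main".toList l || PySem.Chars.isIn ":main".toList l) = true
      · -- a marker occurs in the first line: both sides are empty
        have hA : pvA (l ++ '\n' :: rest) = [] := by
          unfold pvA
          rw [hm]
          simp only [pvAFindIdx]
          rw [if_pos hml]
          simp [PySem.Chars.join_nil]
        rw [hA]
        -- show pvP ≤ l.length and conclude no newline before it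
        have key : ∀ M : List Char, '\n' ∉ M → M <:+: l →
            PySem.Chars.find (l ++ '\n' :: rest) M ≠ -1 ∧
            PySem.Chars.find (l ++ '\n' :: rest) M ≤ (l.length : Int) := by
          intro M hM hMl
          have hceq := pvFind_append_in_l l rest M hM hMl
          constructor
          · rw [hceq]
            exact (PySem.Chars.find_ne_neg_one_iff _ _).mpr hMl
          · rw [hceq]
            exact PySem.Chars.find_le_length l M
        have hple : pvP (l ++ '\n' :: rest) ≤ (l.length : Int) ∧ pvP (l ++ '\n' :: rest) ≠ -1 := by
          rcases Bool.or_eq_true_iff.mp hml with hm1 | hm1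
          · obtain ⟨hne, hle⟩ := key _ (by decide) ((PySem.Chars.isIn_iff_infix _ _).mp hm1)
            refine ⟨le_trans (pvP_le_find1 _ hne) hle, ?_⟩
            intro hc
            exact hne ((pvP_neg_iff _).mp hc).1
          · obtain ⟨hne, hle⟩ := key _ (by decide) ((PySem.Chars.isIn_iff_infix _ _).mp hm1)
            refine ⟨le_trans (pvP_le_find2 _ hne) hle, ?_⟩
            intro hc
            exact hne ((pvP_neg_iff _).mp hc).2
        obtain ⟨_, h0⟩ := pvP_attains _ hple.2
        apply (pvB_eq_nil _ hple.2 ?_).symm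
        rw [List.take_append_of_le_length (by omega)]
        exact fun hmem => hl (List.mem_of_mem_take hmem)
      · -- no marker in the first line
        have hor := Bool.or_eq_false_iff.mp (Bool.eq_false_iff.mpr hml)
        have hn1 : ¬ ".main".toList <:+: l := (PySem.Chars.isIn_eq_false_iff _ _).mp hor.1
        have hn2 : ¬ ":main".toList <:+: l := (PySem.Chars.isIn_eq_false_iff _ _).mp hor.2
        have hpa := pvP_append l rest hn1 hn2
        by_cases hpr : pvP rest = -1
        · -- no marker anywhere: both sides return the input
          rw [if_pos hpr] at hpa
          have hnone := (pvP_neg_iff rest).mp hpr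
          have hB : pvB (l ++ '\n' :: rest) = l ++ '\n' :: rest := by
            unfold pvB
            rw [if_pos hpa]
          have hall : pvAFindIdx (pvModel rest) = (pvModel rest).length := by
            apply pvAFindIdx_all
            intro x hx
            have hinf := pvModel_mem_infix rest x hx
            apply Bool.or_eq_false_iff.mpr
            constructor
            · exact (PySem.Chars.isIn_eq_false_iff _ _).mpr (fun hc =>
                (PySem.Chars.find_ne_neg_one_iff _ _).mpr (hc.trans hinf) hnone.1)
            · exact (PySem.Chars.isIn_eq_false_iff _ _).mpr (fun hc =>
                (PySem.Chars.find_ne_neg_one_iff _ _).mpr (hc.trans hinf) hnone.2)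
          have hA : pvA (l ++ '\n' :: rest) = l ++ '\n' :: rest := by
            unfold pvA
            rw [hm]
            simp only [pvAFindIdx]
            rw [if_neg hml, hall]
            rw [show (pvModel rest).length + 1 = (l :: pvModel rest).length from rfl, List.take_length]
            rw [← hm, pvJoin_model]
          rw [hA, hB]
        · -- marker in rest
          rw [if_neg hpr] at hpa
          obtain ⟨_, h0'⟩ := pvP_attains rest hpr
          have hple' := pvP_le_length rest
          have hpcs_ne : pvP (l ++ '\n' :: rest) ≠ -1 := by rw [hpa]; omega
          have h0cs : 0 ≤ pvP (l ++ '\n' :: rest) := by rw [hpa]; omega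
          have hlencs : pvP (l ++ '\n' :: rest) ≤ ((l ++ '\n' :: rest).length : Int) := by
            rw [hpa]
            simp only [List.length_append, List.length_cons]
            push_cast
            omega
          have htoNat : (pvP (l ++ '\n' :: rest)).toNat = l.length + (1 + (pvP rest).toNat) := by
            rw [hpa]; omega
          have htake : (l ++ '\n' :: rest).take (pvP (l ++ '\n' :: rest)).toNat
              = l ++ '\n' :: rest.take (pvP rest).toNat := by
            rw [htoNat, List.take_length_add_append, Nat.add_comm 1 _, List.take_succ_cons]
          have hr := pvRfind_append_cons l (rest.take (pvP rest).toNat) '\n' hl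
          have hBrest : pvB rest
              = if PySem.Chars.rfind (rest.take (pvP rest).toNat) ['\n'] = -1 then []
                else rest.take (PySem.Chars.rfind (rest.take (pvP rest).toNat) ['\n']).toNat := by
            unfold pvB
            rw [if_neg hpr, pvNlList, pvRfindFrom_eval _ _ _ h0' hple']
            by_cases hr' : PySem.Chars.rfind (rest.take (pvP rest).toNat) ['\n'] = -1
            · rw [if_pos hr', if_pos hr']
            · rcases pvRfind_single_nonneg (rest.take (pvP rest).toNat) '\n' with hx | hx
              · exact absurd hx hr'
              · rw [if_neg hr', if_neg hr', PySem.Chars.slice_eq_listSlice, PySem.List.slice_to _ hx]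
          have hBcs : pvB (l ++ '\n' :: rest)
              = if PySem.Chars.rfind (rest.take (pvP rest).toNat) ['\n'] = -1 then l
                else l ++ '\n' :: rest.take (PySem.Chars.rfind (rest.take (pvP rest).toNat) ['\n']).toNat := by
            unfold pvB
            rw [if_neg hpcs_ne, pvNlList, pvRfindFrom_eval _ _ _ h0cs hlencs, htake, hr]
            by_cases hr' : PySem.Chars.rfind (rest.take (pvP rest).toNat) ['\n'] = -1
            · rw [if_pos hr', if_pos hr']
              rw [if_neg (by omega : ¬ (l.length : Int) = -1)]
              rw [PySem.Chars.slice_eq_listSlice, PySem.List.slice_to _ (by omega : (0:Int) ≤ l.length)]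
              rw [show ((l.length : Int)).toNat = l.length from by omega, List.take_left]
            · rcases pvRfind_single_nonneg (rest.take (pvP rest).toNat) '\n' with hx | hx
              · exact absurd hx hr'
              · rw [if_neg hr', if_neg hr']
                rw [if_neg (by omega : ¬ ((l.length : Int) + 1 + PySem.Chars.rfind (rest.take (pvP rest).toNat) ['\n'] = -1))]
                rw [PySem.Chars.slice_eq_listSlice, PySem.List.slice_to _ (by omega)]
                rw [show ((l.length : Int) + 1 + PySem.Chars.rfind (rest.take (pvP rest).toNat) ['\n']).toNat
                    = l.length + (1 + (PySem.Chars.rfind (rest.take (pvP rest).toNat) ['\n']).toNat) from by omega]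
                rw [List.take_length_add_append, Nat.add_comm 1 _, List.take_succ_cons]
          have hIH := ih rest hrlen
          have hkiff := pvHead_mark_iff rest hpr
          obtain ⟨t, ht⟩ := pvModel_head rest
          unfold pvA
          rw [hm]
          simp only [pvAFindIdx]
          rw [if_neg hml, hBcs]
          by_cases hr' : PySem.Chars.rfind (rest.take (pvP rest).toNat) ['\n'] = -1
          · have hmark0 := hkiff.mpr hr'
            rw [if_pos hr']
            rw [ht]
            simp only [pvAFindIdx]
            rw [if_pos hmark0]
            simp [PySem.Chars.join_singleton]
          · have hmark0 : (PySem.Chars.isIn ".main".toList (rest.takeWhile (· ≠ '\n')) ||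
                PySem.Chars.isIn ":main".toList (rest.takeWhile (· ≠ '\n'))) = true → False :=
              fun hc => hr' (hkiff.mp hc)
            rw [if_neg hr']
            rw [ht]
            simp only [pvAFindIdx]
            rw [if_neg hmark0]
            -- take (pvAFindIdx t + 1 + 1) (l :: tw :: t) = l :: tw :: take (pvAFindIdx t) t
            rw [List.take_succ_cons, List.take_succ_cons, PySem.Chars.join_cons_cons]
            have hArest : PySem.Chars.join "\n".toList
                ((rest.takeWhile (· ≠ '\n')) :: t.take (pvAFindIdx t)) = pvA rest := by
              unfold pvA
              rw [ht]
              simp only [pvAFindIdx]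
              rw [if_neg hmark0, List.take_succ_cons]
            rw [hArest, hIH, hBrest, if_neg hr']
            rw [pvNlList]
            simp


-- ===== VERDICT (by name: the statement is the Claim_ definition above) =====
theorem remove_main_decl_py_spec : Claim_equal_remove_main_decl_py := by
  intro lines _
  unfold Spec_remove_main_decl_py
  rw [pvA_port, pvB_port, pvMain lines.toList.length lines.toList le_rfl]
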